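-- pv_equiv track=rewrite | github.com/sontung/location-based-generative | planner.py | hash_sg
-- ===== SOURCE A (Python) =====
-- def hash_sg(relationships, ob_names):
--     """
--     hash into unique ID
--     :param relationships: [['brown', 'left', 'purple'] , ['yellow', 'up', 'yellow']]
--     :param ob_names:
--     :return:
--     """
--     a_key = [0]*64
--     pred2id = {"none": 0, "left": 1, "up": 2}
--     predefined_objects1 = ob_names[:]
--     predefined_objects2 = ob_names[:]
--     pair2pred = {}
--     for rel in relationships:
--         if rel[1] != "__in_image__":
--             pair2pred[(rel[0], rel[2])] = pred2id[rel[1]]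
--
--     idx = 0
--     for ob1 in predefined_objects1:
--         for ob2 in predefined_objects2:
--             if (ob1, ob2) in pair2pred:
--                 a_key[idx] = pair2pred[(ob1, ob2)]
--             idx += 1
--     return tuple(a_key)
-- ===== SOURCE B (Python) =====
-- def hash_sg(relationships, ob_names):
--     """
--     hash into unique ID (index-table driven fill instead of scanning all name pairs)
--     """
--     pred2id = {"none": 0, "left": 1, "up": 2}
--     pair2pred = {}
--     for rel in relationships:
--         if rel[1] != "__in_image__":
--             pair2pred[(rel[0], rel[2])] = pred2id[rel[1]]
--     n = len(ob_names)
--     indices = {}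
--     for i, name in enumerate(ob_names):
--         indices.setdefault(name, []).append(i)
--     a_key = [0] * 64
--     for (name1, name2), pred in pair2pred.items():
--         for i in indices.get(name1, []):
--             for j in indices.get(name2, []):
--                 a_key[i * n + j] = pred
--     return tuple(a_key)
-- ===== Notes on version B (the rewrite author's own statement) =====
-- stated objective: alternative
-- what changed: B builds a name->indices table once and fills the 64-slot array by iterating over the relationship dict's entries (cartesian product of index lists, position i*n+j), instead of A's scan over all n^2 ordered name pairs with a dict lookup at each; Pre_ excludes the inputs where A raises (malformed/unknown relationship triples, or a matched pair whose position i*n+j is >= 64).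
import Mathlib
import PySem

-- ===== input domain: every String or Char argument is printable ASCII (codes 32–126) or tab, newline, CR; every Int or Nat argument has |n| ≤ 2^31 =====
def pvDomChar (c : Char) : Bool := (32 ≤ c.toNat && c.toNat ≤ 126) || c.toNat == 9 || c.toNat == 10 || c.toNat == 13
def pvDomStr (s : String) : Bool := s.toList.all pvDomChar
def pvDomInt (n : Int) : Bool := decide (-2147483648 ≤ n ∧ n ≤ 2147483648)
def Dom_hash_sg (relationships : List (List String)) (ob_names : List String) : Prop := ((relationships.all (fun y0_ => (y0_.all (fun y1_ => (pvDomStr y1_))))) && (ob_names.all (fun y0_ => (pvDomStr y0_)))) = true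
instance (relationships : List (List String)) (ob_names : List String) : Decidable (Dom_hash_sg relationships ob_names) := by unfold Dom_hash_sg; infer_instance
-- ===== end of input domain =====

-- B replaces A's scan over all n^2 ordered name pairs by a name->indices table and a fill
-- driven by the relationship dict's entries; equal return value on Pre_ (where Python A returns).

-- ===== PORT A =====
def hash_sg (relationships : List (List String)) (ob_names : List String) : List Int :=
  let a_key : List Int := List.replicate 64 0
  let pred2id : PySem.Dict String Int :=
    PySem.Dict.ofList [("none", 0), ("left", 1), ("up", 2)]
  let predefined_objects1 := ob_names
  let predefined_objects2 := ob_names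
  let pair2pred : PySem.Dict (String × String) Int :=
    relationships.foldl (fun d rel =>
      if PySem.List.pyGetD rel 1 "" ≠ "__in_image__" then
        d.insert (PySem.List.pyGetD rel 0 "", PySem.List.pyGetD rel 2 "")
          (pred2id.getD (PySem.List.pyGetD rel 1 "") 0)
      else d) PySem.Dict.empty
  let fin := predefined_objects1.foldl (fun st ob1 =>
    predefined_objects2.foldl (fun st ob2 =>
      let a := if pair2pred.contains (ob1, ob2) then
                 PySem.List.pySetD st.1 st.2 (pair2pred.getD (ob1, ob2) 0)
               else st.1
      (a, st.2 + 1)) st) (a_key, (0 : Int))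
  fin.1

-- ===== PORT B =====
def hash_sg_alt (relationships : List (List String)) (ob_names : List String) : List Int :=
  let pred2id : PySem.Dict String Int :=
    PySem.Dict.ofList [("none", 0), ("left", 1), ("up", 2)]
  let pair2pred : PySem.Dict (String × String) Int :=
    relationships.foldl (fun d rel =>
      if PySem.List.pyGetD rel 1 "" ≠ "__in_image__" then
        d.insert (PySem.List.pyGetD rel 0 "", PySem.List.pyGetD rel 2 "")
          (pred2id.getD (PySem.List.pyGetD rel 1 "") 0)
      else d) PySem.Dict.empty
  let n : Int := ob_names.length
  let indices : PySem.Dict String (List Int) :=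
    (ob_names.zipIdx.map (fun p => (p.1, (p.2 : Int)))).foldl
      (fun d p => d.modify p.1 [] (· ++ [p.2])) PySem.Dict.empty
  let a0 : List Int := List.replicate 64 0
  pair2pred.items.foldl (fun a it =>
    (indices.getD it.1.1 []).foldl (fun a i =>
      (indices.getD it.1.2 []).foldl (fun a j =>
        PySem.List.pySetD a (i * n + j) it.2) a) a) a0

-- ===== PRECONDITION & SPEC =====
-- Pre_ holds exactly where Python A returns: it excludes relationship entries that raise
-- (too short, or a predicate outside pred2id and not "__in_image__" -> KeyError/IndexError)
-- and matched name pairs whose flat position i*n+j is >= 64 (a_key[idx] -> IndexError).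
def Pre_hash_sg (relationships : List (List String)) (ob_names : List String) : Prop :=
  (∀ rel ∈ relationships, 2 ≤ rel.length ∧
      (rel.getD 1 "" = "__in_image__" ∨
        (3 ≤ rel.length ∧ (rel.getD 1 "" = "none" ∨ rel.getD 1 "" = "left" ∨ rel.getD 1 "" = "up")))) ∧
  (∀ i < ob_names.length, ∀ j < ob_names.length, 64 ≤ i * ob_names.length + j →
      ∀ rel ∈ relationships, ¬(rel.getD 1 "" ≠ "__in_image__" ∧
        rel.getD 0 "" = ob_names.getD i "" ∧ rel.getD 2 "" = ob_names.getD j ""))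
instance (relationships : List (List String)) (ob_names : List String) : Decidable (Pre_hash_sg relationships ob_names) := by unfold Pre_hash_sg; infer_instance

def pvWitness_hash_sg : List (List String) × List String :=
  ([["brown", "left", "purple"], ["yellow", "up", "yellow"]], ["brown", "purple", "yellow"])

def Spec_hash_sg (relationships : List (List String)) (ob_names : List String) (out : List Int) : Prop := out = hash_sg_alt relationships ob_names
instance (relationships : List (List String)) (ob_names : List String) (out : List Int) : Decidable (Spec_hash_sg relationships ob_names out) := by unfold Spec_hash_sg; infer_instance

-- ===== CLAIM (what is proved, stated in full; the proofs are below) =====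
def Claim_equal_hash_sg : Prop := ∀ (relationships : List (List String)) (ob_names : List String), Dom_hash_sg relationships ob_names → Pre_hash_sg relationships ob_names → Spec_hash_sg relationships ob_names (hash_sg relationships ob_names)


-- ===== LEMMAS AND PROOFS =====

-- The pair->predicate dict both ports build (identical folds in the two ports).
def pvPairDict (relationships : List (List String)) : PySem.Dict (String × String) Int :=
  relationships.foldl (fun d rel =>
    if PySem.List.pyGetD rel 1 "" ≠ "__in_image__" then
      d.insert (PySem.List.pyGetD rel 0 "", PySem.List.pyGetD rel 2 "")
        ((PySem.Dict.ofList [("none", (0 : Int)), ("left", 1), ("up", 2)]).getD (PySem.List.pyGetD rel 1 "") 0)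
    else d) PySem.Dict.empty

-- One write step: set position w.1 to value w.2 (Python a[idx] = v).
def pvW (a : List Int) (w : Int × Int) : List Int := PySem.List.pySetD a w.1 w.2

-- The writes performed by A's inner loop over ob2 ∈ M starting at index idx.
def pvRow (d : PySem.Dict (String × String) Int) (ob1 : String) : List String → Int → List (Int × Int)
  | [], _ => []
  | ob2 :: M, idx =>
      (if d.contains (ob1, ob2) then [(idx, d.getD (ob1, ob2) 0)] else []) ++ pvRow d ob1 M (idx + 1)

-- The writes performed by A's outer loop over ob1 ∈ M.
def pvWsA (d : PySem.Dict (String × String) Int) (L : List String) : List String → Int → List (Int × Int)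
  | [], _ => []
  | ob1 :: M, idx => pvRow d ob1 L idx ++ pvWsA d L M (idx + (L.length : Int))

-- B's name -> indices dict.
def pvInd (L : List String) : PySem.Dict String (List Int) :=
  (L.zipIdx.map (fun p => (p.1, (p.2 : Int)))).foldl (fun d p => d.modify p.1 [] (· ++ [p.2])) PySem.Dict.empty

-- The writes performed by B.
def pvWsB (relationships : List (List String)) (L : List String) : List (Int × Int) :=
  (pvPairDict relationships).items.flatMap (fun it =>
    ((pvInd L).getD it.1.1 []).flatMap (fun i =>
      ((pvInd L).getD it.1.2 []).map (fun j => (i * (L.length : Int) + j, it.2))))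

lemma pvInnerA (d : PySem.Dict (String × String) Int) (ob1 : String) :
    ∀ (M : List String) (a : List Int) (idx : Int),
      M.foldl (fun st ob2 =>
        ((if d.contains (ob1, ob2) then PySem.List.pySetD st.1 st.2 (d.getD (ob1, ob2) 0) else st.1),
          st.2 + 1)) (a, idx)
      = ((pvRow d ob1 M idx).foldl pvW a, idx + (M.length : Int)) := by
  intro M
  induction M with
  | nil => intro a idx; simp [pvRow]
  | cons x M ih =>
    intro a idx
    by_cases h : d.contains (ob1, x) = true <;>
      simp [pvRow, h, ih, pvW] <;> ring

lemma pvOuterA (d : PySem.Dict (String × String) Int) (L : List String) :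
    ∀ (M : List String) (a : List Int) (idx : Int),
      M.foldl (fun st ob1 =>
        L.foldl (fun st ob2 =>
          ((if d.contains (ob1, ob2) then PySem.List.pySetD st.1 st.2 (d.getD (ob1, ob2) 0) else st.1),
            st.2 + 1)) st) (a, idx)
      = ((pvWsA d L M idx).foldl pvW a, idx + ((M.length * L.length : Nat) : Int)) := by
  intro M
  induction M with
  | nil => intro a idx; simp [pvWsA]
  | cons x M ih =>
    intro a idx
    simp only [List.foldl_cons, pvInnerA, pvWsA, List.foldl_append, ih]
    congr 1
    simp only [List.length_cons]
    push_cast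
    ring

lemma pvHashA_eq (relationships : List (List String)) (ob_names : List String) :
    hash_sg relationships ob_names
      = (pvWsA (pvPairDict relationships) ob_names ob_names 0).foldl pvW (List.replicate 64 0) := by
  simp only [hash_sg, pvPairDict, pvOuterA]

lemma pvFoldlFlatMap {α β γ : Type} (g : β → List γ) (f : α → γ → α) :
    ∀ (l : List β) (a : α), (l.flatMap g).foldl f a = l.foldl (fun a x => (g x).foldl f a) a := by
  intro l
  induction l with
  | nil => intro a; simp
  | cons x l ih => intro a; simp [List.foldl_append, ih]

lemma pvHashB_eq (relationships : List (List String)) (ob_names : List String) :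
    hash_sg_alt relationships ob_names
      = (pvWsB relationships ob_names).foldl pvW (List.replicate 64 0) := by
  simp only [hash_sg_alt, pvWsB, pvPairDict, pvInd, pvW, pvFoldlFlatMap, List.foldl_map]

lemma pvInd_getD (L : List String) (s : String) :
    (pvInd L).getD s []
      = ((L.zipIdx.map (fun p => (p.1, (p.2 : Int)))).filter (fun p => p.1 == s)).map (·.2) := by
  simp [pvInd, PySem.Dict.getD_foldl_modify_append]

lemma pvInd_mem (L : List String) (s : String) (x : Int) :
    x ∈ (pvInd L).getD s [] ↔ ∃ m : Nat, m < L.length ∧ L.getD m "" = s ∧ x = (m : Int) := by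
  rw [pvInd_getD]
  simp only [List.mem_map, List.mem_filter, List.mem_map, List.mem_zipIdx_iff_getElem?]
  constructor
  · rintro ⟨p, ⟨⟨q, hq, rfl⟩, hs⟩, rfl⟩
    refine ⟨q.2, ?_, ?_, rfl⟩
    · exact (List.getElem?_eq_some_iff.mp hq).1
    · obtain ⟨h1, h2⟩ := List.getElem?_eq_some_iff.mp hq
      simp only [beq_iff_eq] at hs
      simp [List.getD_eq_getElem?_getD, List.getElem?_eq_some_iff.mpr ⟨h1, h2⟩, ← hs]
  · rintro ⟨m, hm, hs, rfl⟩
    refine ⟨(L[m], (m : Int)), ⟨⟨(L[m], m), ?_, rfl⟩, ?_⟩, rfl⟩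
    · simp [List.getElem?_eq_some_iff.mpr ⟨hm, rfl⟩]
    · simp only [beq_iff_eq]
      simpa [List.getD_eq_getElem?_getD, List.getElem?_eq_getElem hm] using hs

lemma pvInd_nodup (L : List String) (s : String) : ((pvInd L).getD s []).Nodup := by
  rw [pvInd_getD]
  have hsub : (((L.zipIdx.map (fun p => (p.1, (p.2 : Int)))).filter (fun p => p.1 == s)).map (·.2)).Sublist
      ((L.zipIdx.map (fun p => (p.1, (p.2 : Int)))).map (·.2)) :=
    List.Sublist.map _ List.filter_sublist
  refine hsub.nodup ?_
  have h2 := (List.nodup_zipIdx_map_snd L).map (f := fun n : Nat => (n : Int))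
    (fun a b h => by simpa using h)
  rw [List.map_map] at h2
  rw [List.map_map]
  simpa [Function.comp] using h2

lemma pvPairDict_nodup (relationships : List (List String)) : (pvPairDict relationships).keys.Nodup := by
  suffices h : ∀ d : PySem.Dict (String × String) Int, d.keys.Nodup →
      (relationships.foldl (fun d rel =>
        if PySem.List.pyGetD rel 1 "" ≠ "__in_image__" then
          d.insert (PySem.List.pyGetD rel 0 "", PySem.List.pyGetD rel 2 "")
            ((PySem.Dict.ofList [("none", (0 : Int)), ("left", 1), ("up", 2)]).getD (PySem.List.pyGetD rel 1 "") 0)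
        else d) d).keys.Nodup by
    exact h _ PySem.Dict.nodup_keys_empty
  induction relationships with
  | nil => intro d hd; simpa using hd
  | cons rel rels ih =>
    intro d hd
    simp only [List.foldl_cons]
    split
    · exact ih _ (PySem.Dict.nodup_keys_insert _ _ _ hd)
    · exact ih _ hd

lemma pvRow_mem (d : PySem.Dict (String × String) Int) (ob1 : String) :
    ∀ (M : List String) (idx : Int) (w : Int × Int),
      w ∈ pvRow d ob1 M idx ↔
        ∃ j : Nat, j < M.length ∧ w.1 = idx + (j : Int) ∧ d.get? (ob1, M.getD j "") = some w.2 := by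
  intro M
  induction M with
  | nil => intro idx w; simp [pvRow]
  | cons x M ih =>
    intro idx w
    simp only [pvRow, List.mem_append, ih]
    constructor
    · rintro (hw | ⟨j, hj, h1, h2⟩)
      · by_cases h : d.contains (ob1, x) = true
        · simp only [h, if_pos] at hw
          simp only [List.mem_singleton] at hw
          subst hw
          refine ⟨0, by simp, by simp, ?_⟩
          have := PySem.Dict.contains_eq_isSome_get? (d := d) (k := (ob1, x))
          rw [h] at this
          obtain ⟨v, hv⟩ := Option.isSome_iff_exists.mp this.symm
          simp [PySem.Dict.getD_eq_get?_getD, hv]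
        · simp [h] at hw
      · exact ⟨j + 1, by simp only [List.length_cons]; omega, by omega, by simpa using h2⟩
    · rintro ⟨j, hj, h1, h2⟩
      cases j with
      | zero =>
        left
        simp only [List.getD_cons_zero] at h2
        have hc : d.contains (ob1, x) = true := by
          rw [PySem.Dict.contains_eq_isSome_get?, h2]; rfl
        simp only [hc, if_pos, List.mem_singleton]
        have : w.2 = d.getD (ob1, x) 0 := by
          simp [PySem.Dict.getD_eq_get?_getD, h2]
        simp only [Int.natCast_zero, add_zero] at h1
        exact Prod.ext h1 this
      | succ j =>
        right
        exact ⟨j, by simp only [List.length_cons] at hj; omega, by omega, by simpa using h2⟩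

lemma pvWsA_mem (d : PySem.Dict (String × String) Int) (L : List String) :
    ∀ (M : List String) (idx : Int) (w : Int × Int),
      w ∈ pvWsA d L M idx ↔
        ∃ i : Nat, i < M.length ∧ ∃ j : Nat, j < L.length ∧
          w.1 = idx + (i : Int) * (L.length : Int) + (j : Int) ∧
          d.get? (M.getD i "", L.getD j "") = some w.2 := by
  intro M
  induction M with
  | nil => intro idx w; simp [pvWsA]
  | cons x M ih =>
    intro idx w
    simp only [pvWsA, List.mem_append, pvRow_mem, ih]
    constructor
    · rintro (⟨j, hj, h1, h2⟩ | ⟨i, hi, j, hj, h1, h2⟩)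
      · exact ⟨0, by simp, j, hj, by push_cast; linarith, by simpa using h2⟩
      · exact ⟨i + 1, by simp only [List.length_cons]; omega, j, hj,
          by push_cast at h1 ⊢; linarith, by simpa using h2⟩
    · rintro ⟨i, hi, j, hj, h1, h2⟩
      cases i with
      | zero =>
        left
        exact ⟨j, hj, by push_cast at h1 ⊢; linarith, by simpa using h2⟩
      | succ i =>
        right
        exact ⟨i, by simp only [List.length_cons] at hi; omega, j, hj,
          by push_cast at h1 ⊢; linarith, by simpa using h2⟩

lemma pvWsB_mem (relationships : List (List String)) (L : List String) (w : Int × Int) :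
    w ∈ pvWsB relationships L ↔
      ∃ i : Nat, i < L.length ∧ ∃ j : Nat, j < L.length ∧
        w.1 = (i : Int) * (L.length : Int) + (j : Int) ∧
        (pvPairDict relationships).get? (L.getD i "", L.getD j "") = some w.2 := by
  simp only [pvWsB, List.mem_flatMap, List.mem_map, pvInd_mem]
  constructor
  · rintro ⟨it, hit, i, ⟨mi, hmi, hsi, rfl⟩, j, ⟨mj, hmj, hsj, rfl⟩, rfl⟩
    refine ⟨mi, hmi, mj, hmj, rfl, ?_⟩
    rw [hsi, hsj]
    have : (it.1.1, it.1.2) = it.1 := rfl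
    rw [this]
    exact PySem.Dict.get?_of_mem_items _ hit (pvPairDict_nodup relationships)
  · rintro ⟨i, hi, j, hj, h1, h2⟩
    refine ⟨((L.getD i "", L.getD j ""), w.2),
      (PySem.Dict.get?_eq_some_iff_mem_items _ _ _ (pvPairDict_nodup relationships)).mp h2,
      (i : Int), ⟨i, hi, rfl, rfl⟩, (j : Int), ⟨j, hj, rfl, rfl⟩, ?_⟩
    exact Prod.ext h1.symm rfl

lemma pvPosInj {n i j i' j' : Nat} (hj : j < n) (hj' : j' < n)
    (h : (i : Int) * (n : Int) + (j : Int) = (i' : Int) * (n : Int) + (j' : Int)) :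
    i = i' ∧ j = j' := by
  have hn : 0 < n := by omega
  have hnat : i * n + j = i' * n + j' := by exact_mod_cast h
  have hi : i = i' := by
    have e1 : (i * n + j) / n = i := by
      rw [Nat.mul_comm i n, Nat.mul_add_div hn, Nat.div_eq_of_lt hj, Nat.add_zero]
    have e2 : (i' * n + j') / n = i' := by
      rw [Nat.mul_comm i' n, Nat.mul_add_div hn, Nat.div_eq_of_lt hj', Nat.add_zero]
    rw [← e1, ← e2, hnat]
  exact ⟨hi, by subst hi; omega⟩

lemma pvPosInjInt {n : Nat} {i j i' j' : Int} (hi0 : 0 ≤ i) (hj0 : 0 ≤ j)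
    (hi0' : 0 ≤ i') (hj0' : 0 ≤ j') (hj : j < (n : Int)) (hj' : j' < (n : Int))
    (h : i * (n : Int) + j = i' * (n : Int) + j') : i = i' ∧ j = j' := by
  obtain ⟨h1, h2⟩ := pvPosInj (n := n) (i := i.toNat) (j := j.toNat)
    (i' := i'.toNat) (j' := j'.toNat) (by omega) (by omega)
    (by rw [Int.toNat_of_nonneg hi0, Int.toNat_of_nonneg hj0,
          Int.toNat_of_nonneg hi0', Int.toNat_of_nonneg hj0']; exact h)
  omega

lemma pvRow_sorted (d : PySem.Dict (String × String) Int) (ob1 : String) :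
    ∀ (M : List String) (idx : Int), ((pvRow d ob1 M idx).map Prod.fst).Pairwise (· < ·) := by
  intro M
  induction M with
  | nil => intro idx; simp [pvRow]
  | cons x M ih =>
    intro idx
    simp only [pvRow, List.map_append]
    refine List.pairwise_append.mpr ⟨?_, ih _, ?_⟩
    · split <;> simp
    · intro a ha b hb
      simp only [List.mem_map] at hb
      obtain ⟨w, hw, rfl⟩ := hb
      obtain ⟨jj, hjj, h1, -⟩ := (pvRow_mem d ob1 M (idx + 1) w).mp hw
      have ha' : a = idx := by
        split at ha <;> simp_all
      omega

lemma pvWsA_sorted (d : PySem.Dict (String × String) Int) (L : List String) :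
    ∀ (M : List String) (idx : Int), ((pvWsA d L M idx).map Prod.fst).Pairwise (· < ·) := by
  intro M
  induction M with
  | nil => intro idx; simp [pvWsA]
  | cons x M ih =>
    intro idx
    simp only [pvWsA, List.map_append]
    refine List.pairwise_append.mpr ⟨pvRow_sorted d x L idx, ih _, ?_⟩
    intro a ha b hb
    simp only [List.mem_map] at ha hb
    obtain ⟨w, hw, rfl⟩ := ha
    obtain ⟨w', hw', rfl⟩ := hb
    obtain ⟨j, hj, h1, -⟩ := (pvRow_mem d x L idx w).mp hw
    obtain ⟨i', hi', j', hj', h1', -⟩ := (pvWsA_mem d L M (idx + (L.length : Int)) w').mp hw'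
    have hnn : (0 : Int) ≤ (i' : Int) * (L.length : Int) := by positivity
    omega

lemma pvWsA_nodup_fst (d : PySem.Dict (String × String) Int) (L M : List String) (idx : Int) :
    ((pvWsA d L M idx).map Prod.fst).Nodup :=
  (pvWsA_sorted d L M idx).imp (fun h => ne_of_lt h)

lemma pvWsB_nodup_fst (relationships : List (List String)) (L : List String) :
    ((pvWsB relationships L).map Prod.fst).Nodup := by
  have hbound : ∀ (s : String) (x : Int), x ∈ (pvInd L).getD s [] →
      0 ≤ x ∧ x < (L.length : Int) := by
    intro s x hx
    obtain ⟨m, hm, -, rfl⟩ := (pvInd_mem L s x).mp hx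
    constructor
    · positivity
    · exact_mod_cast hm
  have hname : ∀ (s : String) (x : Int), x ∈ (pvInd L).getD s [] → L.getD x.toNat "" = s := by
    intro s x hx
    obtain ⟨m, hm, hs, rfl⟩ := (pvInd_mem L s x).mp hx
    simpa using hs
  rw [pvWsB, List.map_flatMap]
  rw [List.nodup_flatMap]
  constructor
  · intro it hit
    rw [List.map_flatMap, List.nodup_flatMap]
    constructor
    · intro i hi
      rw [List.map_map]
      refine (pvInd_nodup L it.1.2).map ?_
      intro a b h
      simpa using h
    · refine (pvInd_nodup L it.1.1).imp_of_mem ?_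
      intro i i' hmi hmi' h x hx hx'
      simp only [List.map_map, List.mem_map, Function.comp] at hx hx'
      obtain ⟨j, hj, rfl⟩ := hx
      obtain ⟨j', hj', h2⟩ := hx'
      obtain ⟨hja, hjb⟩ := hbound _ _ hj
      obtain ⟨hj'a, hj'b⟩ := hbound _ _ hj'
      obtain ⟨hia, hib⟩ := hbound _ _ hmi
      obtain ⟨hi'a, hi'b⟩ := hbound _ _ hmi'
      exact h (pvPosInjInt hia hja hi'a hj'a hjb hj'b h2.symm).1
  · have hkeys : (pvPairDict relationships).items.Pairwise (fun a b => a.1 ≠ b.1) :=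
      List.pairwise_map.mp (pvPairDict_nodup relationships)
    refine hkeys.imp ?_
    intro it it' hne x hx hx'
    simp only [List.map_flatMap, List.map_map, List.mem_flatMap, List.mem_map,
      Function.comp] at hx hx'
    obtain ⟨i, hi, j, hj, rfl⟩ := hx
    obtain ⟨i', hi', j', hj', heq⟩ := hx'
    obtain ⟨hia, hib⟩ := hbound _ _ hi
    obtain ⟨hja, hjb⟩ := hbound _ _ hj
    obtain ⟨hi'a, hi'b⟩ := hbound _ _ hi'
    obtain ⟨hj'a, hj'b⟩ := hbound _ _ hj'
    obtain ⟨hii, hjj⟩ := pvPosInjInt hi'a hj'a hia hja hj'b hjb heq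
    apply hne
    have e1 : it.1.1 = it'.1.1 := by
      rw [← hname _ _ hi, ← hname _ _ hi', hii]
    have e2 : it.1.2 = it'.1.2 := by
      rw [← hname _ _ hj, ← hname _ _ hj', hjj]
    exact Prod.ext e1 e2

lemma pvFoldPerm (ws1 ws2 : List (Int × Int)) (hperm : ws1.Perm ws2)
    (hnd : (ws1.map Prod.fst).Nodup) (hnn : ∀ w ∈ ws1, 0 ≤ w.1) (a : List Int) :
    ws1.foldl pvW a = ws2.foldl pvW a := by
  refine List.Perm.foldl_eq' hperm ?_ a
  intro x hx y hy z
  by_cases hxy : x = y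
  · subst hxy; rfl
  · have hne : x.1 ≠ y.1 := by
      intro h
      exact hxy (List.inj_on_of_nodup_map hnd hx hy h)
    have h0x := hnn x hx
    have h0y := hnn y hy
    have key : ∀ (a : List Int) (w : Int × Int), 0 ≤ w.1 → pvW a w = a.set w.1.toNat w.2 := by
      intro a w hw
      simp [pvW, PySem.List.pySetD_of_nonneg, hw]
    have hne' : x.1.toNat ≠ y.1.toNat := by omega
    simp only [key _ x h0x, key _ y h0y]
    exact List.set_comm _ _ hne'

-- ===== VERDICT (by name: the statement is the Claim_ definition above) =====
theorem hash_sg_spec : Claim_equal_hash_sg := by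
  intro relationships ob_names _ _
  unfold Spec_hash_sg
  rw [pvHashA_eq, pvHashB_eq]
  have hnn : ∀ w ∈ pvWsA (pvPairDict relationships) ob_names ob_names 0, 0 ≤ w.1 := by
    intro w hw
    obtain ⟨i, hi, j, hj, h1, -⟩ := (pvWsA_mem _ _ _ _ w).mp hw
    have : (0 : Int) ≤ (i : Int) * (ob_names.length : Int) := by positivity
    omega
  refine pvFoldPerm _ _ ?_ (pvWsA_nodup_fst _ _ _ _) hnn _
  refine (List.perm_ext_iff_of_nodup ((pvWsA_nodup_fst _ _ _ _).of_map _) ((pvWsB_nodup_fst _ _).of_map _)).mpr ?_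
  intro w
  rw [pvWsA_mem, pvWsB_mem]
  simp only [zero_add]
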